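-- pv_equiv track=rewrite | github.com/amis-shokoohi/dns_monkey | dns_monkey.py | find_resolver_by_ip
-- ===== SOURCE A (Python) =====
-- resolvers = {
--     "None": [],
--     "Cloudflare": ["1.1.1.1", "1.0.0.1"],
--     "Google": ["8.8.8.8", "8.8.4.4"],
--     "Quad9": ["9.9.9.9", "49.112.112.112"],
--     "Quad9 ECS": ["9.9.9.11", "149.112.112.11"],
--     "Verisign": ["64.6.64.6", "64.6.65.6"],
--     "AdGuard": ["94.140.14.14", "94.140.15.15"],
--     "Electro": ["78.157.42.100", "78.157.42.101"],
--     "Shecan": ["178.22.122.100", "185.51.200.2"],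
--     "Begzar": ["185.55.225.25", "185.55.226.26"],
--     "Radar": ["10.202.10.10", "10.202.10.11"],
--     "403": ["10.202.10.102", "10.202.10.202"],
-- }
--
-- def find_resolver_by_ip(ips):
--     if len(ips) == 1:
--         for k, v in resolvers.items():
--             if ips[0] in v:
--                 return k
--     if len(ips) == 2:
--         for k, v in resolvers.items():
--             if ips[0] in v and ips[1] in v:
--                 return k
--     return "None"
-- ===== SOURCE B (Python) =====
-- resolvers = {
--     "None": [],
--     "Cloudflare": ["1.1.1.1", "1.0.0.1"],
--     "Google": ["8.8.8.8", "8.8.4.4"],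
--     "Quad9": ["9.9.9.9", "49.112.112.112"],
--     "Quad9 ECS": ["9.9.9.11", "149.112.112.11"],
--     "Verisign": ["64.6.64.6", "64.6.65.6"],
--     "AdGuard": ["94.140.14.14", "94.140.15.15"],
--     "Electro": ["78.157.42.100", "78.157.42.101"],
--     "Shecan": ["178.22.122.100", "185.51.200.2"],
--     "Begzar": ["185.55.225.25", "185.55.226.26"],
--     "Radar": ["10.202.10.10", "10.202.10.11"],
--     "403": ["10.202.10.102", "10.202.10.202"],
-- }
--
-- # Reverse index: every IP occurs in exactly one resolver's list.
-- ip_to_name = {ip: name for name, lst in resolvers.items() for ip in lst}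
--
-- def find_resolver_by_ip(ips):
--     if len(ips) == 1:
--         return ip_to_name.get(ips[0], "None")
--     if len(ips) == 2:
--         n0 = ip_to_name.get(ips[0])
--         n1 = ip_to_name.get(ips[1])
--         return n0 if n0 is not None and n0 == n1 else "None"
--     return "None"
-- ===== Notes on version B (the rewrite author's own statement) =====
-- stated objective: idiomatic
-- what changed: Replaced the per-call scans over all resolver lists with a module-level reverse index mapping each IP to its resolver name, so the function does direct dictionary lookups instead of iterating resolvers.items().
import Mathlib
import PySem

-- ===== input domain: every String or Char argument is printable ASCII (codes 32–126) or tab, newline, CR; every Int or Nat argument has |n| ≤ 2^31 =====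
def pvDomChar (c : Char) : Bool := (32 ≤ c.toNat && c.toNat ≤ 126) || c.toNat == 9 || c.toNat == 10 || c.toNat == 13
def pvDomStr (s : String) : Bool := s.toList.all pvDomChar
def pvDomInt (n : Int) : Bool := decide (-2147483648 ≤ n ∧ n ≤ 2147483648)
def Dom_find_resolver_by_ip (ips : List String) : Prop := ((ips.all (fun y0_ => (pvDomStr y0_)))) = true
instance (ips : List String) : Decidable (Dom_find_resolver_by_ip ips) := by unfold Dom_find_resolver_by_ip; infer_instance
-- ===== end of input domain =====

-- B replaces A's per-call scans over resolvers.items() with direct lookups in a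
-- precomputed IP→name reverse index (idiomatic; return value identical).

-- ===== PORT A =====
def pvResolvers : List (String × List String) :=
  [("None", []),
   ("Cloudflare", ["1.1.1.1", "1.0.0.1"]),
   ("Google", ["8.8.8.8", "8.8.4.4"]),
   ("Quad9", ["9.9.9.9", "49.112.112.112"]),
   ("Quad9 ECS", ["9.9.9.11", "149.112.112.11"]),
   ("Verisign", ["64.6.64.6", "64.6.65.6"]),
   ("AdGuard", ["94.140.14.14", "94.140.15.15"]),
   ("Electro", ["78.157.42.100", "78.157.42.101"]),
   ("Shecan", ["178.22.122.100", "185.51.200.2"]),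
   ("Begzar", ["185.55.225.25", "185.55.226.26"]),
   ("Radar", ["10.202.10.10", "10.202.10.11"]),
   ("403", ["10.202.10.102", "10.202.10.202"])]

-- the 'for k, v in resolvers.items(): if ips[0] in v: return k' loop
def pvScan1 : List (String × List String) → String → Option String
  | [], _ => none
  | (k, v) :: rest, ip => if v.contains ip then some k else pvScan1 rest ip

-- the 'for k, v in resolvers.items(): if ips[0] in v and ips[1] in v: return k' loop
def pvScan2 : List (String × List String) → String → String → Option String
  | [], _, _ => none
  | (k, v) :: rest, ip0, ip1 =>
      if v.contains ip0 && v.contains ip1 then some k else pvScan2 rest ip0 ip1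

def find_resolver_by_ip (ips : List String) : String :=
  match (if PySem.List.len ips = 1 then pvScan1 pvResolvers (PySem.List.pyGetD ips 0 "") else none) with
  | some k => k
  | none =>
    match (if PySem.List.len ips = 2 then
             pvScan2 pvResolvers (PySem.List.pyGetD ips 0 "") (PySem.List.pyGetD ips 1 "")
           else none) with
    | some k => k
    | none => "None"

-- ===== PORT B =====
-- ip_to_name = {ip: name for name, lst in resolvers.items() for ip in lst}
def pvIpToName : PySem.Dict String String :=
  PySem.Dict.mk
    [("1.1.1.1", "Cloudflare"), ("1.0.0.1", "Cloudflare"),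
     ("8.8.8.8", "Google"), ("8.8.4.4", "Google"),
     ("9.9.9.9", "Quad9"), ("49.112.112.112", "Quad9"),
     ("9.9.9.11", "Quad9 ECS"), ("149.112.112.11", "Quad9 ECS"),
     ("64.6.64.6", "Verisign"), ("64.6.65.6", "Verisign"),
     ("94.140.14.14", "AdGuard"), ("94.140.15.15", "AdGuard"),
     ("78.157.42.100", "Electro"), ("78.157.42.101", "Electro"),
     ("178.22.122.100", "Shecan"), ("185.51.200.2", "Shecan"),
     ("185.55.225.25", "Begzar"), ("185.55.226.26", "Begzar"),
     ("10.202.10.10", "Radar"), ("10.202.10.11", "Radar"),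
     ("10.202.10.102", "403"), ("10.202.10.202", "403")]

def find_resolver_by_ip_alt (ips : List String) : String :=
  if PySem.List.len ips = 1 then
    (PySem.Dict.get? pvIpToName (PySem.List.pyGetD ips 0 "")).getD "None"
  else if PySem.List.len ips = 2 then
    let n0 := PySem.Dict.get? pvIpToName (PySem.List.pyGetD ips 0 "")
    let n1 := PySem.Dict.get? pvIpToName (PySem.List.pyGetD ips 1 "")
    match n0 with
    | some n => if n1 = some n then n else "None"
    | none => "None"
  else "None"

-- ===== PRECONDITION & SPEC =====
def Spec_find_resolver_by_ip (ips : List String) (out : String) : Prop := out = find_resolver_by_ip_alt ips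
instance (ips : List String) (out : String) : Decidable (Spec_find_resolver_by_ip ips out) := by unfold Spec_find_resolver_by_ip; infer_instance

-- ===== CLAIM (what is proved, stated in full; the proofs are below) =====
def Claim_equal_find_resolver_by_ip : Prop := ∀ (ips : List String), Dom_find_resolver_by_ip ips → Spec_find_resolver_by_ip ips (find_resolver_by_ip ips)

-- ===== LEMMAS AND PROOFS =====

set_option maxHeartbeats 4000000 in
lemma pvCase1 (x : String) : find_resolver_by_ip [x] = find_resolver_by_ip_alt [x] := by
  by_cases hx0 : x = "1.1.1.1"
  · subst hx0; decide
  by_cases hx1 : x = "1.0.0.1"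
  · subst hx1; decide
  by_cases hx2 : x = "8.8.8.8"
  · subst hx2; decide
  by_cases hx3 : x = "8.8.4.4"
  · subst hx3; decide
  by_cases hx4 : x = "9.9.9.9"
  · subst hx4; decide
  by_cases hx5 : x = "49.112.112.112"
  · subst hx5; decide
  by_cases hx6 : x = "9.9.9.11"
  · subst hx6; decide
  by_cases hx7 : x = "149.112.112.11"
  · subst hx7; decide
  by_cases hx8 : x = "64.6.64.6"
  · subst hx8; decide
  by_cases hx9 : x = "64.6.65.6"
  · subst hx9; decide
  by_cases hx10 : x = "94.140.14.14"
  · subst hx10; decide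
  by_cases hx11 : x = "94.140.15.15"
  · subst hx11; decide
  by_cases hx12 : x = "78.157.42.100"
  · subst hx12; decide
  by_cases hx13 : x = "78.157.42.101"
  · subst hx13; decide
  by_cases hx14 : x = "178.22.122.100"
  · subst hx14; decide
  by_cases hx15 : x = "185.51.200.2"
  · subst hx15; decide
  by_cases hx16 : x = "185.55.225.25"
  · subst hx16; decide
  by_cases hx17 : x = "185.55.226.26"
  · subst hx17; decide
  by_cases hx18 : x = "10.202.10.10"
  · subst hx18; decide
  by_cases hx19 : x = "10.202.10.11"
  · subst hx19; decide
  by_cases hx20 : x = "10.202.10.102"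
  · subst hx20; decide
  by_cases hx21 : x = "10.202.10.202"
  · subst hx21; decide
  · simp only [find_resolver_by_ip, find_resolver_by_ip_alt, pvScan1, pvScan2, pvResolvers, pvIpToName, PySem.Dict.get?_mk_cons, PySem.List.len, PySem.List.pyGetD_zero_cons]
    simp [hx0, hx1, hx2, hx3, hx4, hx5, hx6, hx7, hx8, hx9, hx10, hx11, hx12, hx13, hx14, hx15, hx16, hx17, hx18, hx19, hx20, hx21, Ne.symm hx0, Ne.symm hx1, Ne.symm hx2, Ne.symm hx3, Ne.symm hx4, Ne.symm hx5, Ne.symm hx6, Ne.symm hx7, Ne.symm hx8, Ne.symm hx9, Ne.symm hx10, Ne.symm hx11, Ne.symm hx12, Ne.symm hx13, Ne.symm hx14, Ne.symm hx15, Ne.symm hx16, Ne.symm hx17, Ne.symm hx18, Ne.symm hx19, Ne.symm hx20, Ne.symm hx21, PySem.Dict.get?]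


set_option maxHeartbeats 8000000 in
lemma pvCase2 (x y : String) : find_resolver_by_ip [x, y] = find_resolver_by_ip_alt [x, y] := by
  by_cases hx0 : x = "1.1.1.1"
  · subst hx0
    by_cases hy0_0 : y = "1.1.1.1"
    · subst hy0_0; decide
    by_cases hy0_1 : y = "1.0.0.1"
    · subst hy0_1; decide
    by_cases hy0_2 : y = "8.8.8.8"
    · subst hy0_2; decide
    by_cases hy0_3 : y = "8.8.4.4"
    · subst hy0_3; decide
    by_cases hy0_4 : y = "9.9.9.9"
    · subst hy0_4; decide
    by_cases hy0_5 : y = "49.112.112.112"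
    · subst hy0_5; decide
    by_cases hy0_6 : y = "9.9.9.11"
    · subst hy0_6; decide
    by_cases hy0_7 : y = "149.112.112.11"
    · subst hy0_7; decide
    by_cases hy0_8 : y = "64.6.64.6"
    · subst hy0_8; decide
    by_cases hy0_9 : y = "64.6.65.6"
    · subst hy0_9; decide
    by_cases hy0_10 : y = "94.140.14.14"
    · subst hy0_10; decide
    by_cases hy0_11 : y = "94.140.15.15"
    · subst hy0_11; decide
    by_cases hy0_12 : y = "78.157.42.100"
    · subst hy0_12; decide
    by_cases hy0_13 : y = "78.157.42.101"
    · subst hy0_13; decide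
    by_cases hy0_14 : y = "178.22.122.100"
    · subst hy0_14; decide
    by_cases hy0_15 : y = "185.51.200.2"
    · subst hy0_15; decide
    by_cases hy0_16 : y = "185.55.225.25"
    · subst hy0_16; decide
    by_cases hy0_17 : y = "185.55.226.26"
    · subst hy0_17; decide
    by_cases hy0_18 : y = "10.202.10.10"
    · subst hy0_18; decide
    by_cases hy0_19 : y = "10.202.10.11"
    · subst hy0_19; decide
    by_cases hy0_20 : y = "10.202.10.102"
    · subst hy0_20; decide
    by_cases hy0_21 : y = "10.202.10.202"
    · subst hy0_21; decide
    · simp only [find_resolver_by_ip, find_resolver_by_ip_alt, pvScan1, pvScan2, pvResolvers, pvIpToName, PySem.Dict.get?_mk_cons, PySem.List.len, PySem.List.pyGetD]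
      simp [hy0_0, hy0_1, hy0_2, hy0_3, hy0_4, hy0_5, hy0_6, hy0_7, hy0_8, hy0_9, hy0_10, hy0_11, hy0_12, hy0_13, hy0_14, hy0_15, hy0_16, hy0_17, hy0_18, hy0_19, hy0_20, hy0_21, Ne.symm hy0_0, Ne.symm hy0_1, Ne.symm hy0_2, Ne.symm hy0_3, Ne.symm hy0_4, Ne.symm hy0_5, Ne.symm hy0_6, Ne.symm hy0_7, Ne.symm hy0_8, Ne.symm hy0_9, Ne.symm hy0_10, Ne.symm hy0_11, Ne.symm hy0_12, Ne.symm hy0_13, Ne.symm hy0_14, Ne.symm hy0_15, Ne.symm hy0_16, Ne.symm hy0_17, Ne.symm hy0_18, Ne.symm hy0_19, Ne.symm hy0_20, Ne.symm hy0_21, PySem.Dict.get?]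
  by_cases hx1 : x = "1.0.0.1"
  · subst hx1
    by_cases hy1_0 : y = "1.1.1.1"
    · subst hy1_0; decide
    by_cases hy1_1 : y = "1.0.0.1"
    · subst hy1_1; decide
    by_cases hy1_2 : y = "8.8.8.8"
    · subst hy1_2; decide
    by_cases hy1_3 : y = "8.8.4.4"
    · subst hy1_3; decide
    by_cases hy1_4 : y = "9.9.9.9"
    · subst hy1_4; decide
    by_cases hy1_5 : y = "49.112.112.112"
    · subst hy1_5; decide
    by_cases hy1_6 : y = "9.9.9.11"
    · subst hy1_6; decide
    by_cases hy1_7 : y = "149.112.112.11"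
    · subst hy1_7; decide
    by_cases hy1_8 : y = "64.6.64.6"
    · subst hy1_8; decide
    by_cases hy1_9 : y = "64.6.65.6"
    · subst hy1_9; decide
    by_cases hy1_10 : y = "94.140.14.14"
    · subst hy1_10; decide
    by_cases hy1_11 : y = "94.140.15.15"
    · subst hy1_11; decide
    by_cases hy1_12 : y = "78.157.42.100"
    · subst hy1_12; decide
    by_cases hy1_13 : y = "78.157.42.101"
    · subst hy1_13; decide
    by_cases hy1_14 : y = "178.22.122.100"
    · subst hy1_14; decide
    by_cases hy1_15 : y = "185.51.200.2"
    · subst hy1_15; decide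
    by_cases hy1_16 : y = "185.55.225.25"
    · subst hy1_16; decide
    by_cases hy1_17 : y = "185.55.226.26"
    · subst hy1_17; decide
    by_cases hy1_18 : y = "10.202.10.10"
    · subst hy1_18; decide
    by_cases hy1_19 : y = "10.202.10.11"
    · subst hy1_19; decide
    by_cases hy1_20 : y = "10.202.10.102"
    · subst hy1_20; decide
    by_cases hy1_21 : y = "10.202.10.202"
    · subst hy1_21; decide
    · simp only [find_resolver_by_ip, find_resolver_by_ip_alt, pvScan1, pvScan2, pvResolvers, pvIpToName, PySem.Dict.get?_mk_cons, PySem.List.len, PySem.List.pyGetD]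
      simp [hy1_0, hy1_1, hy1_2, hy1_3, hy1_4, hy1_5, hy1_6, hy1_7, hy1_8, hy1_9, hy1_10, hy1_11, hy1_12, hy1_13, hy1_14, hy1_15, hy1_16, hy1_17, hy1_18, hy1_19, hy1_20, hy1_21, Ne.symm hy1_0, Ne.symm hy1_1, Ne.symm hy1_2, Ne.symm hy1_3, Ne.symm hy1_4, Ne.symm hy1_5, Ne.symm hy1_6, Ne.symm hy1_7, Ne.symm hy1_8, Ne.symm hy1_9, Ne.symm hy1_10, Ne.symm hy1_11, Ne.symm hy1_12, Ne.symm hy1_13, Ne.symm hy1_14, Ne.symm hy1_15, Ne.symm hy1_16, Ne.symm hy1_17, Ne.symm hy1_18, Ne.symm hy1_19, Ne.symm hy1_20, Ne.symm hy1_21, PySem.Dict.get?]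
  by_cases hx2 : x = "8.8.8.8"
  · subst hx2
    by_cases hy2_0 : y = "1.1.1.1"
    · subst hy2_0; decide
    by_cases hy2_1 : y = "1.0.0.1"
    · subst hy2_1; decide
    by_cases hy2_2 : y = "8.8.8.8"
    · subst hy2_2; decide
    by_cases hy2_3 : y = "8.8.4.4"
    · subst hy2_3; decide
    by_cases hy2_4 : y = "9.9.9.9"
    · subst hy2_4; decide
    by_cases hy2_5 : y = "49.112.112.112"
    · subst hy2_5; decide
    by_cases hy2_6 : y = "9.9.9.11"
    · subst hy2_6; decide
    by_cases hy2_7 : y = "149.112.112.11"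
    · subst hy2_7; decide
    by_cases hy2_8 : y = "64.6.64.6"
    · subst hy2_8; decide
    by_cases hy2_9 : y = "64.6.65.6"
    · subst hy2_9; decide
    by_cases hy2_10 : y = "94.140.14.14"
    · subst hy2_10; decide
    by_cases hy2_11 : y = "94.140.15.15"
    · subst hy2_11; decide
    by_cases hy2_12 : y = "78.157.42.100"
    · subst hy2_12; decide
    by_cases hy2_13 : y = "78.157.42.101"
    · subst hy2_13; decide
    by_cases hy2_14 : y = "178.22.122.100"
    · subst hy2_14; decide
    by_cases hy2_15 : y = "185.51.200.2"
    · subst hy2_15; decide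
    by_cases hy2_16 : y = "185.55.225.25"
    · subst hy2_16; decide
    by_cases hy2_17 : y = "185.55.226.26"
    · subst hy2_17; decide
    by_cases hy2_18 : y = "10.202.10.10"
    · subst hy2_18; decide
    by_cases hy2_19 : y = "10.202.10.11"
    · subst hy2_19; decide
    by_cases hy2_20 : y = "10.202.10.102"
    · subst hy2_20; decide
    by_cases hy2_21 : y = "10.202.10.202"
    · subst hy2_21; decide
    · simp only [find_resolver_by_ip, find_resolver_by_ip_alt, pvScan1, pvScan2, pvResolvers, pvIpToName, PySem.Dict.get?_mk_cons, PySem.List.len, PySem.List.pyGetD]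
      simp [hy2_0, hy2_1, hy2_2, hy2_3, hy2_4, hy2_5, hy2_6, hy2_7, hy2_8, hy2_9, hy2_10, hy2_11, hy2_12, hy2_13, hy2_14, hy2_15, hy2_16, hy2_17, hy2_18, hy2_19, hy2_20, hy2_21, Ne.symm hy2_0, Ne.symm hy2_1, Ne.symm hy2_2, Ne.symm hy2_3, Ne.symm hy2_4, Ne.symm hy2_5, Ne.symm hy2_6, Ne.symm hy2_7, Ne.symm hy2_8, Ne.symm hy2_9, Ne.symm hy2_10, Ne.symm hy2_11, Ne.symm hy2_12, Ne.symm hy2_13, Ne.symm hy2_14, Ne.symm hy2_15, Ne.symm hy2_16, Ne.symm hy2_17, Ne.symm hy2_18, Ne.symm hy2_19, Ne.symm hy2_20, Ne.symm hy2_21, PySem.Dict.get?]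
  by_cases hx3 : x = "8.8.4.4"
  · subst hx3
    by_cases hy3_0 : y = "1.1.1.1"
    · subst hy3_0; decide
    by_cases hy3_1 : y = "1.0.0.1"
    · subst hy3_1; decide
    by_cases hy3_2 : y = "8.8.8.8"
    · subst hy3_2; decide
    by_cases hy3_3 : y = "8.8.4.4"
    · subst hy3_3; decide
    by_cases hy3_4 : y = "9.9.9.9"
    · subst hy3_4; decide
    by_cases hy3_5 : y = "49.112.112.112"
    · subst hy3_5; decide
    by_cases hy3_6 : y = "9.9.9.11"
    · subst hy3_6; decide
    by_cases hy3_7 : y = "149.112.112.11"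
    · subst hy3_7; decide
    by_cases hy3_8 : y = "64.6.64.6"
    · subst hy3_8; decide
    by_cases hy3_9 : y = "64.6.65.6"
    · subst hy3_9; decide
    by_cases hy3_10 : y = "94.140.14.14"
    · subst hy3_10; decide
    by_cases hy3_11 : y = "94.140.15.15"
    · subst hy3_11; decide
    by_cases hy3_12 : y = "78.157.42.100"
    · subst hy3_12; decide
    by_cases hy3_13 : y = "78.157.42.101"
    · subst hy3_13; decide
    by_cases hy3_14 : y = "178.22.122.100"
    · subst hy3_14; decide
    by_cases hy3_15 : y = "185.51.200.2"
    · subst hy3_15; decide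
    by_cases hy3_16 : y = "185.55.225.25"
    · subst hy3_16; decide
    by_cases hy3_17 : y = "185.55.226.26"
    · subst hy3_17; decide
    by_cases hy3_18 : y = "10.202.10.10"
    · subst hy3_18; decide
    by_cases hy3_19 : y = "10.202.10.11"
    · subst hy3_19; decide
    by_cases hy3_20 : y = "10.202.10.102"
    · subst hy3_20; decide
    by_cases hy3_21 : y = "10.202.10.202"
    · subst hy3_21; decide
    · simp only [find_resolver_by_ip, find_resolver_by_ip_alt, pvScan1, pvScan2, pvResolvers, pvIpToName, PySem.Dict.get?_mk_cons, PySem.List.len, PySem.List.pyGetD]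
      simp [hy3_0, hy3_1, hy3_2, hy3_3, hy3_4, hy3_5, hy3_6, hy3_7, hy3_8, hy3_9, hy3_10, hy3_11, hy3_12, hy3_13, hy3_14, hy3_15, hy3_16, hy3_17, hy3_18, hy3_19, hy3_20, hy3_21, Ne.symm hy3_0, Ne.symm hy3_1, Ne.symm hy3_2, Ne.symm hy3_3, Ne.symm hy3_4, Ne.symm hy3_5, Ne.symm hy3_6, Ne.symm hy3_7, Ne.symm hy3_8, Ne.symm hy3_9, Ne.symm hy3_10, Ne.symm hy3_11, Ne.symm hy3_12, Ne.symm hy3_13, Ne.symm hy3_14, Ne.symm hy3_15, Ne.symm hy3_16, Ne.symm hy3_17, Ne.symm hy3_18, Ne.symm hy3_19, Ne.symm hy3_20, Ne.symm hy3_21, PySem.Dict.get?]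
  by_cases hx4 : x = "9.9.9.9"
  · subst hx4
    by_cases hy4_0 : y = "1.1.1.1"
    · subst hy4_0; decide
    by_cases hy4_1 : y = "1.0.0.1"
    · subst hy4_1; decide
    by_cases hy4_2 : y = "8.8.8.8"
    · subst hy4_2; decide
    by_cases hy4_3 : y = "8.8.4.4"
    · subst hy4_3; decide
    by_cases hy4_4 : y = "9.9.9.9"
    · subst hy4_4; decide
    by_cases hy4_5 : y = "49.112.112.112"
    · subst hy4_5; decide
    by_cases hy4_6 : y = "9.9.9.11"
    · subst hy4_6; decide
    by_cases hy4_7 : y = "149.112.112.11"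
    · subst hy4_7; decide
    by_cases hy4_8 : y = "64.6.64.6"
    · subst hy4_8; decide
    by_cases hy4_9 : y = "64.6.65.6"
    · subst hy4_9; decide
    by_cases hy4_10 : y = "94.140.14.14"
    · subst hy4_10; decide
    by_cases hy4_11 : y = "94.140.15.15"
    · subst hy4_11; decide
    by_cases hy4_12 : y = "78.157.42.100"
    · subst hy4_12; decide
    by_cases hy4_13 : y = "78.157.42.101"
    · subst hy4_13; decide
    by_cases hy4_14 : y = "178.22.122.100"
    · subst hy4_14; decide
    by_cases hy4_15 : y = "185.51.200.2"
    · subst hy4_15; decide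
    by_cases hy4_16 : y = "185.55.225.25"
    · subst hy4_16; decide
    by_cases hy4_17 : y = "185.55.226.26"
    · subst hy4_17; decide
    by_cases hy4_18 : y = "10.202.10.10"
    · subst hy4_18; decide
    by_cases hy4_19 : y = "10.202.10.11"
    · subst hy4_19; decide
    by_cases hy4_20 : y = "10.202.10.102"
    · subst hy4_20; decide
    by_cases hy4_21 : y = "10.202.10.202"
    · subst hy4_21; decide
    · simp only [find_resolver_by_ip, find_resolver_by_ip_alt, pvScan1, pvScan2, pvResolvers, pvIpToName, PySem.Dict.get?_mk_cons, PySem.List.len, PySem.List.pyGetD]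
      simp [hy4_0, hy4_1, hy4_2, hy4_3, hy4_4, hy4_5, hy4_6, hy4_7, hy4_8, hy4_9, hy4_10, hy4_11, hy4_12, hy4_13, hy4_14, hy4_15, hy4_16, hy4_17, hy4_18, hy4_19, hy4_20, hy4_21, Ne.symm hy4_0, Ne.symm hy4_1, Ne.symm hy4_2, Ne.symm hy4_3, Ne.symm hy4_4, Ne.symm hy4_5, Ne.symm hy4_6, Ne.symm hy4_7, Ne.symm hy4_8, Ne.symm hy4_9, Ne.symm hy4_10, Ne.symm hy4_11, Ne.symm hy4_12, Ne.symm hy4_13, Ne.symm hy4_14, Ne.symm hy4_15, Ne.symm hy4_16, Ne.symm hy4_17, Ne.symm hy4_18, Ne.symm hy4_19, Ne.symm hy4_20, Ne.symm hy4_21, PySem.Dict.get?]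
  by_cases hx5 : x = "49.112.112.112"
  · subst hx5
    by_cases hy5_0 : y = "1.1.1.1"
    · subst hy5_0; decide
    by_cases hy5_1 : y = "1.0.0.1"
    · subst hy5_1; decide
    by_cases hy5_2 : y = "8.8.8.8"
    · subst hy5_2; decide
    by_cases hy5_3 : y = "8.8.4.4"
    · subst hy5_3; decide
    by_cases hy5_4 : y = "9.9.9.9"
    · subst hy5_4; decide
    by_cases hy5_5 : y = "49.112.112.112"
    · subst hy5_5; decide
    by_cases hy5_6 : y = "9.9.9.11"
    · subst hy5_6; decide
    by_cases hy5_7 : y = "149.112.112.11"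
    · subst hy5_7; decide
    by_cases hy5_8 : y = "64.6.64.6"
    · subst hy5_8; decide
    by_cases hy5_9 : y = "64.6.65.6"
    · subst hy5_9; decide
    by_cases hy5_10 : y = "94.140.14.14"
    · subst hy5_10; decide
    by_cases hy5_11 : y = "94.140.15.15"
    · subst hy5_11; decide
    by_cases hy5_12 : y = "78.157.42.100"
    · subst hy5_12; decide
    by_cases hy5_13 : y = "78.157.42.101"
    · subst hy5_13; decide
    by_cases hy5_14 : y = "178.22.122.100"
    · subst hy5_14; decide
    by_cases hy5_15 : y = "185.51.200.2"
    · subst hy5_15; decide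
    by_cases hy5_16 : y = "185.55.225.25"
    · subst hy5_16; decide
    by_cases hy5_17 : y = "185.55.226.26"
    · subst hy5_17; decide
    by_cases hy5_18 : y = "10.202.10.10"
    · subst hy5_18; decide
    by_cases hy5_19 : y = "10.202.10.11"
    · subst hy5_19; decide
    by_cases hy5_20 : y = "10.202.10.102"
    · subst hy5_20; decide
    by_cases hy5_21 : y = "10.202.10.202"
    · subst hy5_21; decide
    · simp only [find_resolver_by_ip, find_resolver_by_ip_alt, pvScan1, pvScan2, pvResolvers, pvIpToName, PySem.Dict.get?_mk_cons, PySem.List.len, PySem.List.pyGetD]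
      simp [hy5_0, hy5_1, hy5_2, hy5_3, hy5_4, hy5_5, hy5_6, hy5_7, hy5_8, hy5_9, hy5_10, hy5_11, hy5_12, hy5_13, hy5_14, hy5_15, hy5_16, hy5_17, hy5_18, hy5_19, hy5_20, hy5_21, Ne.symm hy5_0, Ne.symm hy5_1, Ne.symm hy5_2, Ne.symm hy5_3, Ne.symm hy5_4, Ne.symm hy5_5, Ne.symm hy5_6, Ne.symm hy5_7, Ne.symm hy5_8, Ne.symm hy5_9, Ne.symm hy5_10, Ne.symm hy5_11, Ne.symm hy5_12, Ne.symm hy5_13, Ne.symm hy5_14, Ne.symm hy5_15, Ne.symm hy5_16, Ne.symm hy5_17, Ne.symm hy5_18, Ne.symm hy5_19, Ne.symm hy5_20, Ne.symm hy5_21, PySem.Dict.get?]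
  by_cases hx6 : x = "9.9.9.11"
  · subst hx6
    by_cases hy6_0 : y = "1.1.1.1"
    · subst hy6_0; decide
    by_cases hy6_1 : y = "1.0.0.1"
    · subst hy6_1; decide
    by_cases hy6_2 : y = "8.8.8.8"
    · subst hy6_2; decide
    by_cases hy6_3 : y = "8.8.4.4"
    · subst hy6_3; decide
    by_cases hy6_4 : y = "9.9.9.9"
    · subst hy6_4; decide
    by_cases hy6_5 : y = "49.112.112.112"
    · subst hy6_5; decide
    by_cases hy6_6 : y = "9.9.9.11"
    · subst hy6_6; decide
    by_cases hy6_7 : y = "149.112.112.11"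
    · subst hy6_7; decide
    by_cases hy6_8 : y = "64.6.64.6"
    · subst hy6_8; decide
    by_cases hy6_9 : y = "64.6.65.6"
    · subst hy6_9; decide
    by_cases hy6_10 : y = "94.140.14.14"
    · subst hy6_10; decide
    by_cases hy6_11 : y = "94.140.15.15"
    · subst hy6_11; decide
    by_cases hy6_12 : y = "78.157.42.100"
    · subst hy6_12; decide
    by_cases hy6_13 : y = "78.157.42.101"
    · subst hy6_13; decide
    by_cases hy6_14 : y = "178.22.122.100"
    · subst hy6_14; decide
    by_cases hy6_15 : y = "185.51.200.2"
    · subst hy6_15; decide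
    by_cases hy6_16 : y = "185.55.225.25"
    · subst hy6_16; decide
    by_cases hy6_17 : y = "185.55.226.26"
    · subst hy6_17; decide
    by_cases hy6_18 : y = "10.202.10.10"
    · subst hy6_18; decide
    by_cases hy6_19 : y = "10.202.10.11"
    · subst hy6_19; decide
    by_cases hy6_20 : y = "10.202.10.102"
    · subst hy6_20; decide
    by_cases hy6_21 : y = "10.202.10.202"
    · subst hy6_21; decide
    · simp only [find_resolver_by_ip, find_resolver_by_ip_alt, pvScan1, pvScan2, pvResolvers, pvIpToName, PySem.Dict.get?_mk_cons, PySem.List.len, PySem.List.pyGetD]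
      simp [hy6_0, hy6_1, hy6_2, hy6_3, hy6_4, hy6_5, hy6_6, hy6_7, hy6_8, hy6_9, hy6_10, hy6_11, hy6_12, hy6_13, hy6_14, hy6_15, hy6_16, hy6_17, hy6_18, hy6_19, hy6_20, hy6_21, Ne.symm hy6_0, Ne.symm hy6_1, Ne.symm hy6_2, Ne.symm hy6_3, Ne.symm hy6_4, Ne.symm hy6_5, Ne.symm hy6_6, Ne.symm hy6_7, Ne.symm hy6_8, Ne.symm hy6_9, Ne.symm hy6_10, Ne.symm hy6_11, Ne.symm hy6_12, Ne.symm hy6_13, Ne.symm hy6_14, Ne.symm hy6_15, Ne.symm hy6_16, Ne.symm hy6_17, Ne.symm hy6_18, Ne.symm hy6_19, Ne.symm hy6_20, Ne.symm hy6_21, PySem.Dict.get?]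
  by_cases hx7 : x = "149.112.112.11"
  · subst hx7
    by_cases hy7_0 : y = "1.1.1.1"
    · subst hy7_0; decide
    by_cases hy7_1 : y = "1.0.0.1"
    · subst hy7_1; decide
    by_cases hy7_2 : y = "8.8.8.8"
    · subst hy7_2; decide
    by_cases hy7_3 : y = "8.8.4.4"
    · subst hy7_3; decide
    by_cases hy7_4 : y = "9.9.9.9"
    · subst hy7_4; decide
    by_cases hy7_5 : y = "49.112.112.112"
    · subst hy7_5; decide
    by_cases hy7_6 : y = "9.9.9.11"
    · subst hy7_6; decide
    by_cases hy7_7 : y = "149.112.112.11"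
    · subst hy7_7; decide
    by_cases hy7_8 : y = "64.6.64.6"
    · subst hy7_8; decide
    by_cases hy7_9 : y = "64.6.65.6"
    · subst hy7_9; decide
    by_cases hy7_10 : y = "94.140.14.14"
    · subst hy7_10; decide
    by_cases hy7_11 : y = "94.140.15.15"
    · subst hy7_11; decide
    by_cases hy7_12 : y = "78.157.42.100"
    · subst hy7_12; decide
    by_cases hy7_13 : y = "78.157.42.101"
    · subst hy7_13; decide
    by_cases hy7_14 : y = "178.22.122.100"
    · subst hy7_14; decide
    by_cases hy7_15 : y = "185.51.200.2"
    · subst hy7_15; decide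
    by_cases hy7_16 : y = "185.55.225.25"
    · subst hy7_16; decide
    by_cases hy7_17 : y = "185.55.226.26"
    · subst hy7_17; decide
    by_cases hy7_18 : y = "10.202.10.10"
    · subst hy7_18; decide
    by_cases hy7_19 : y = "10.202.10.11"
    · subst hy7_19; decide
    by_cases hy7_20 : y = "10.202.10.102"
    · subst hy7_20; decide
    by_cases hy7_21 : y = "10.202.10.202"
    · subst hy7_21; decide
    · simp only [find_resolver_by_ip, find_resolver_by_ip_alt, pvScan1, pvScan2, pvResolvers, pvIpToName, PySem.Dict.get?_mk_cons, PySem.List.len, PySem.List.pyGetD]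
      simp [hy7_0, hy7_1, hy7_2, hy7_3, hy7_4, hy7_5, hy7_6, hy7_7, hy7_8, hy7_9, hy7_10, hy7_11, hy7_12, hy7_13, hy7_14, hy7_15, hy7_16, hy7_17, hy7_18, hy7_19, hy7_20, hy7_21, Ne.symm hy7_0, Ne.symm hy7_1, Ne.symm hy7_2, Ne.symm hy7_3, Ne.symm hy7_4, Ne.symm hy7_5, Ne.symm hy7_6, Ne.symm hy7_7, Ne.symm hy7_8, Ne.symm hy7_9, Ne.symm hy7_10, Ne.symm hy7_11, Ne.symm hy7_12, Ne.symm hy7_13, Ne.symm hy7_14, Ne.symm hy7_15, Ne.symm hy7_16, Ne.symm hy7_17, Ne.symm hy7_18, Ne.symm hy7_19, Ne.symm hy7_20, Ne.symm hy7_21, PySem.Dict.get?]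
  by_cases hx8 : x = "64.6.64.6"
  · subst hx8
    by_cases hy8_0 : y = "1.1.1.1"
    · subst hy8_0; decide
    by_cases hy8_1 : y = "1.0.0.1"
    · subst hy8_1; decide
    by_cases hy8_2 : y = "8.8.8.8"
    · subst hy8_2; decide
    by_cases hy8_3 : y = "8.8.4.4"
    · subst hy8_3; decide
    by_cases hy8_4 : y = "9.9.9.9"
    · subst hy8_4; decide
    by_cases hy8_5 : y = "49.112.112.112"
    · subst hy8_5; decide
    by_cases hy8_6 : y = "9.9.9.11"
    · subst hy8_6; decide
    by_cases hy8_7 : y = "149.112.112.11"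
    · subst hy8_7; decide
    by_cases hy8_8 : y = "64.6.64.6"
    · subst hy8_8; decide
    by_cases hy8_9 : y = "64.6.65.6"
    · subst hy8_9; decide
    by_cases hy8_10 : y = "94.140.14.14"
    · subst hy8_10; decide
    by_cases hy8_11 : y = "94.140.15.15"
    · subst hy8_11; decide
    by_cases hy8_12 : y = "78.157.42.100"
    · subst hy8_12; decide
    by_cases hy8_13 : y = "78.157.42.101"
    · subst hy8_13; decide
    by_cases hy8_14 : y = "178.22.122.100"
    · subst hy8_14; decide
    by_cases hy8_15 : y = "185.51.200.2"
    · subst hy8_15; decide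
    by_cases hy8_16 : y = "185.55.225.25"
    · subst hy8_16; decide
    by_cases hy8_17 : y = "185.55.226.26"
    · subst hy8_17; decide
    by_cases hy8_18 : y = "10.202.10.10"
    · subst hy8_18; decide
    by_cases hy8_19 : y = "10.202.10.11"
    · subst hy8_19; decide
    by_cases hy8_20 : y = "10.202.10.102"
    · subst hy8_20; decide
    by_cases hy8_21 : y = "10.202.10.202"
    · subst hy8_21; decide
    · simp only [find_resolver_by_ip, find_resolver_by_ip_alt, pvScan1, pvScan2, pvResolvers, pvIpToName, PySem.Dict.get?_mk_cons, PySem.List.len, PySem.List.pyGetD]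
      simp [hy8_0, hy8_1, hy8_2, hy8_3, hy8_4, hy8_5, hy8_6, hy8_7, hy8_8, hy8_9, hy8_10, hy8_11, hy8_12, hy8_13, hy8_14, hy8_15, hy8_16, hy8_17, hy8_18, hy8_19, hy8_20, hy8_21, Ne.symm hy8_0, Ne.symm hy8_1, Ne.symm hy8_2, Ne.symm hy8_3, Ne.symm hy8_4, Ne.symm hy8_5, Ne.symm hy8_6, Ne.symm hy8_7, Ne.symm hy8_8, Ne.symm hy8_9, Ne.symm hy8_10, Ne.symm hy8_11, Ne.symm hy8_12, Ne.symm hy8_13, Ne.symm hy8_14, Ne.symm hy8_15, Ne.symm hy8_16, Ne.symm hy8_17, Ne.symm hy8_18, Ne.symm hy8_19, Ne.symm hy8_20, Ne.symm hy8_21, PySem.Dict.get?]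
  by_cases hx9 : x = "64.6.65.6"
  · subst hx9
    by_cases hy9_0 : y = "1.1.1.1"
    · subst hy9_0; decide
    by_cases hy9_1 : y = "1.0.0.1"
    · subst hy9_1; decide
    by_cases hy9_2 : y = "8.8.8.8"
    · subst hy9_2; decide
    by_cases hy9_3 : y = "8.8.4.4"
    · subst hy9_3; decide
    by_cases hy9_4 : y = "9.9.9.9"
    · subst hy9_4; decide
    by_cases hy9_5 : y = "49.112.112.112"
    · subst hy9_5; decide
    by_cases hy9_6 : y = "9.9.9.11"
    · subst hy9_6; decide
    by_cases hy9_7 : y = "149.112.112.11"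
    · subst hy9_7; decide
    by_cases hy9_8 : y = "64.6.64.6"
    · subst hy9_8; decide
    by_cases hy9_9 : y = "64.6.65.6"
    · subst hy9_9; decide
    by_cases hy9_10 : y = "94.140.14.14"
    · subst hy9_10; decide
    by_cases hy9_11 : y = "94.140.15.15"
    · subst hy9_11; decide
    by_cases hy9_12 : y = "78.157.42.100"
    · subst hy9_12; decide
    by_cases hy9_13 : y = "78.157.42.101"
    · subst hy9_13; decide
    by_cases hy9_14 : y = "178.22.122.100"
    · subst hy9_14; decide
    by_cases hy9_15 : y = "185.51.200.2"
    · subst hy9_15; decide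
    by_cases hy9_16 : y = "185.55.225.25"
    · subst hy9_16; decide
    by_cases hy9_17 : y = "185.55.226.26"
    · subst hy9_17; decide
    by_cases hy9_18 : y = "10.202.10.10"
    · subst hy9_18; decide
    by_cases hy9_19 : y = "10.202.10.11"
    · subst hy9_19; decide
    by_cases hy9_20 : y = "10.202.10.102"
    · subst hy9_20; decide
    by_cases hy9_21 : y = "10.202.10.202"
    · subst hy9_21; decide
    · simp only [find_resolver_by_ip, find_resolver_by_ip_alt, pvScan1, pvScan2, pvResolvers, pvIpToName, PySem.Dict.get?_mk_cons, PySem.List.len, PySem.List.pyGetD]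
      simp [hy9_0, hy9_1, hy9_2, hy9_3, hy9_4, hy9_5, hy9_6, hy9_7, hy9_8, hy9_9, hy9_10, hy9_11, hy9_12, hy9_13, hy9_14, hy9_15, hy9_16, hy9_17, hy9_18, hy9_19, hy9_20, hy9_21, Ne.symm hy9_0, Ne.symm hy9_1, Ne.symm hy9_2, Ne.symm hy9_3, Ne.symm hy9_4, Ne.symm hy9_5, Ne.symm hy9_6, Ne.symm hy9_7, Ne.symm hy9_8, Ne.symm hy9_9, Ne.symm hy9_10, Ne.symm hy9_11, Ne.symm hy9_12, Ne.symm hy9_13, Ne.symm hy9_14, Ne.symm hy9_15, Ne.symm hy9_16, Ne.symm hy9_17, Ne.symm hy9_18, Ne.symm hy9_19, Ne.symm hy9_20, Ne.symm hy9_21, PySem.Dict.get?]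
  by_cases hx10 : x = "94.140.14.14"
  · subst hx10
    by_cases hy10_0 : y = "1.1.1.1"
    · subst hy10_0; decide
    by_cases hy10_1 : y = "1.0.0.1"
    · subst hy10_1; decide
    by_cases hy10_2 : y = "8.8.8.8"
    · subst hy10_2; decide
    by_cases hy10_3 : y = "8.8.4.4"
    · subst hy10_3; decide
    by_cases hy10_4 : y = "9.9.9.9"
    · subst hy10_4; decide
    by_cases hy10_5 : y = "49.112.112.112"
    · subst hy10_5; decide
    by_cases hy10_6 : y = "9.9.9.11"
    · subst hy10_6; decide
    by_cases hy10_7 : y = "149.112.112.11"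
    · subst hy10_7; decide
    by_cases hy10_8 : y = "64.6.64.6"
    · subst hy10_8; decide
    by_cases hy10_9 : y = "64.6.65.6"
    · subst hy10_9; decide
    by_cases hy10_10 : y = "94.140.14.14"
    · subst hy10_10; decide
    by_cases hy10_11 : y = "94.140.15.15"
    · subst hy10_11; decide
    by_cases hy10_12 : y = "78.157.42.100"
    · subst hy10_12; decide
    by_cases hy10_13 : y = "78.157.42.101"
    · subst hy10_13; decide
    by_cases hy10_14 : y = "178.22.122.100"
    · subst hy10_14; decide
    by_cases hy10_15 : y = "185.51.200.2"
    · subst hy10_15; decide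
    by_cases hy10_16 : y = "185.55.225.25"
    · subst hy10_16; decide
    by_cases hy10_17 : y = "185.55.226.26"
    · subst hy10_17; decide
    by_cases hy10_18 : y = "10.202.10.10"
    · subst hy10_18; decide
    by_cases hy10_19 : y = "10.202.10.11"
    · subst hy10_19; decide
    by_cases hy10_20 : y = "10.202.10.102"
    · subst hy10_20; decide
    by_cases hy10_21 : y = "10.202.10.202"
    · subst hy10_21; decide
    · simp only [find_resolver_by_ip, find_resolver_by_ip_alt, pvScan1, pvScan2, pvResolvers, pvIpToName, PySem.Dict.get?_mk_cons, PySem.List.len, PySem.List.pyGetD]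
      simp [hy10_0, hy10_1, hy10_2, hy10_3, hy10_4, hy10_5, hy10_6, hy10_7, hy10_8, hy10_9, hy10_10, hy10_11, hy10_12, hy10_13, hy10_14, hy10_15, hy10_16, hy10_17, hy10_18, hy10_19, hy10_20, hy10_21, Ne.symm hy10_0, Ne.symm hy10_1, Ne.symm hy10_2, Ne.symm hy10_3, Ne.symm hy10_4, Ne.symm hy10_5, Ne.symm hy10_6, Ne.symm hy10_7, Ne.symm hy10_8, Ne.symm hy10_9, Ne.symm hy10_10, Ne.symm hy10_11, Ne.symm hy10_12, Ne.symm hy10_13, Ne.symm hy10_14, Ne.symm hy10_15, Ne.symm hy10_16, Ne.symm hy10_17, Ne.symm hy10_18, Ne.symm hy10_19, Ne.symm hy10_20, Ne.symm hy10_21, PySem.Dict.get?]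
  by_cases hx11 : x = "94.140.15.15"
  · subst hx11
    by_cases hy11_0 : y = "1.1.1.1"
    · subst hy11_0; decide
    by_cases hy11_1 : y = "1.0.0.1"
    · subst hy11_1; decide
    by_cases hy11_2 : y = "8.8.8.8"
    · subst hy11_2; decide
    by_cases hy11_3 : y = "8.8.4.4"
    · subst hy11_3; decide
    by_cases hy11_4 : y = "9.9.9.9"
    · subst hy11_4; decide
    by_cases hy11_5 : y = "49.112.112.112"
    · subst hy11_5; decide
    by_cases hy11_6 : y = "9.9.9.11"
    · subst hy11_6; decide
    by_cases hy11_7 : y = "149.112.112.11"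
    · subst hy11_7; decide
    by_cases hy11_8 : y = "64.6.64.6"
    · subst hy11_8; decide
    by_cases hy11_9 : y = "64.6.65.6"
    · subst hy11_9; decide
    by_cases hy11_10 : y = "94.140.14.14"
    · subst hy11_10; decide
    by_cases hy11_11 : y = "94.140.15.15"
    · subst hy11_11; decide
    by_cases hy11_12 : y = "78.157.42.100"
    · subst hy11_12; decide
    by_cases hy11_13 : y = "78.157.42.101"
    · subst hy11_13; decide
    by_cases hy11_14 : y = "178.22.122.100"
    · subst hy11_14; decide
    by_cases hy11_15 : y = "185.51.200.2"
    · subst hy11_15; decide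
    by_cases hy11_16 : y = "185.55.225.25"
    · subst hy11_16; decide
    by_cases hy11_17 : y = "185.55.226.26"
    · subst hy11_17; decide
    by_cases hy11_18 : y = "10.202.10.10"
    · subst hy11_18; decide
    by_cases hy11_19 : y = "10.202.10.11"
    · subst hy11_19; decide
    by_cases hy11_20 : y = "10.202.10.102"
    · subst hy11_20; decide
    by_cases hy11_21 : y = "10.202.10.202"
    · subst hy11_21; decide
    · simp only [find_resolver_by_ip, find_resolver_by_ip_alt, pvScan1, pvScan2, pvResolvers, pvIpToName, PySem.Dict.get?_mk_cons, PySem.List.len, PySem.List.pyGetD]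
      simp [hy11_0, hy11_1, hy11_2, hy11_3, hy11_4, hy11_5, hy11_6, hy11_7, hy11_8, hy11_9, hy11_10, hy11_11, hy11_12, hy11_13, hy11_14, hy11_15, hy11_16, hy11_17, hy11_18, hy11_19, hy11_20, hy11_21, Ne.symm hy11_0, Ne.symm hy11_1, Ne.symm hy11_2, Ne.symm hy11_3, Ne.symm hy11_4, Ne.symm hy11_5, Ne.symm hy11_6, Ne.symm hy11_7, Ne.symm hy11_8, Ne.symm hy11_9, Ne.symm hy11_10, Ne.symm hy11_11, Ne.symm hy11_12, Ne.symm hy11_13, Ne.symm hy11_14, Ne.symm hy11_15, Ne.symm hy11_16, Ne.symm hy11_17, Ne.symm hy11_18, Ne.symm hy11_19, Ne.symm hy11_20, Ne.symm hy11_21, PySem.Dict.get?]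
  by_cases hx12 : x = "78.157.42.100"
  · subst hx12
    by_cases hy12_0 : y = "1.1.1.1"
    · subst hy12_0; decide
    by_cases hy12_1 : y = "1.0.0.1"
    · subst hy12_1; decide
    by_cases hy12_2 : y = "8.8.8.8"
    · subst hy12_2; decide
    by_cases hy12_3 : y = "8.8.4.4"
    · subst hy12_3; decide
    by_cases hy12_4 : y = "9.9.9.9"
    · subst hy12_4; decide
    by_cases hy12_5 : y = "49.112.112.112"
    · subst hy12_5; decide
    by_cases hy12_6 : y = "9.9.9.11"
    · subst hy12_6; decide
    by_cases hy12_7 : y = "149.112.112.11"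
    · subst hy12_7; decide
    by_cases hy12_8 : y = "64.6.64.6"
    · subst hy12_8; decide
    by_cases hy12_9 : y = "64.6.65.6"
    · subst hy12_9; decide
    by_cases hy12_10 : y = "94.140.14.14"
    · subst hy12_10; decide
    by_cases hy12_11 : y = "94.140.15.15"
    · subst hy12_11; decide
    by_cases hy12_12 : y = "78.157.42.100"
    · subst hy12_12; decide
    by_cases hy12_13 : y = "78.157.42.101"
    · subst hy12_13; decide
    by_cases hy12_14 : y = "178.22.122.100"
    · subst hy12_14; decide
    by_cases hy12_15 : y = "185.51.200.2"
    · subst hy12_15; decide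
    by_cases hy12_16 : y = "185.55.225.25"
    · subst hy12_16; decide
    by_cases hy12_17 : y = "185.55.226.26"
    · subst hy12_17; decide
    by_cases hy12_18 : y = "10.202.10.10"
    · subst hy12_18; decide
    by_cases hy12_19 : y = "10.202.10.11"
    · subst hy12_19; decide
    by_cases hy12_20 : y = "10.202.10.102"
    · subst hy12_20; decide
    by_cases hy12_21 : y = "10.202.10.202"
    · subst hy12_21; decide
    · simp only [find_resolver_by_ip, find_resolver_by_ip_alt, pvScan1, pvScan2, pvResolvers, pvIpToName, PySem.Dict.get?_mk_cons, PySem.List.len, PySem.List.pyGetD]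
      simp [hy12_0, hy12_1, hy12_2, hy12_3, hy12_4, hy12_5, hy12_6, hy12_7, hy12_8, hy12_9, hy12_10, hy12_11, hy12_12, hy12_13, hy12_14, hy12_15, hy12_16, hy12_17, hy12_18, hy12_19, hy12_20, hy12_21, Ne.symm hy12_0, Ne.symm hy12_1, Ne.symm hy12_2, Ne.symm hy12_3, Ne.symm hy12_4, Ne.symm hy12_5, Ne.symm hy12_6, Ne.symm hy12_7, Ne.symm hy12_8, Ne.symm hy12_9, Ne.symm hy12_10, Ne.symm hy12_11, Ne.symm hy12_12, Ne.symm hy12_13, Ne.symm hy12_14, Ne.symm hy12_15, Ne.symm hy12_16, Ne.symm hy12_17, Ne.symm hy12_18, Ne.symm hy12_19, Ne.symm hy12_20, Ne.symm hy12_21, PySem.Dict.get?]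
  by_cases hx13 : x = "78.157.42.101"
  · subst hx13
    by_cases hy13_0 : y = "1.1.1.1"
    · subst hy13_0; decide
    by_cases hy13_1 : y = "1.0.0.1"
    · subst hy13_1; decide
    by_cases hy13_2 : y = "8.8.8.8"
    · subst hy13_2; decide
    by_cases hy13_3 : y = "8.8.4.4"
    · subst hy13_3; decide
    by_cases hy13_4 : y = "9.9.9.9"
    · subst hy13_4; decide
    by_cases hy13_5 : y = "49.112.112.112"
    · subst hy13_5; decide
    by_cases hy13_6 : y = "9.9.9.11"
    · subst hy13_6; decide
    by_cases hy13_7 : y = "149.112.112.11"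
    · subst hy13_7; decide
    by_cases hy13_8 : y = "64.6.64.6"
    · subst hy13_8; decide
    by_cases hy13_9 : y = "64.6.65.6"
    · subst hy13_9; decide
    by_cases hy13_10 : y = "94.140.14.14"
    · subst hy13_10; decide
    by_cases hy13_11 : y = "94.140.15.15"
    · subst hy13_11; decide
    by_cases hy13_12 : y = "78.157.42.100"
    · subst hy13_12; decide
    by_cases hy13_13 : y = "78.157.42.101"
    · subst hy13_13; decide
    by_cases hy13_14 : y = "178.22.122.100"
    · subst hy13_14; decide
    by_cases hy13_15 : y = "185.51.200.2"
    · subst hy13_15; decide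
    by_cases hy13_16 : y = "185.55.225.25"
    · subst hy13_16; decide
    by_cases hy13_17 : y = "185.55.226.26"
    · subst hy13_17; decide
    by_cases hy13_18 : y = "10.202.10.10"
    · subst hy13_18; decide
    by_cases hy13_19 : y = "10.202.10.11"
    · subst hy13_19; decide
    by_cases hy13_20 : y = "10.202.10.102"
    · subst hy13_20; decide
    by_cases hy13_21 : y = "10.202.10.202"
    · subst hy13_21; decide
    · simp only [find_resolver_by_ip, find_resolver_by_ip_alt, pvScan1, pvScan2, pvResolvers, pvIpToName, PySem.Dict.get?_mk_cons, PySem.List.len, PySem.List.pyGetD]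
      simp [hy13_0, hy13_1, hy13_2, hy13_3, hy13_4, hy13_5, hy13_6, hy13_7, hy13_8, hy13_9, hy13_10, hy13_11, hy13_12, hy13_13, hy13_14, hy13_15, hy13_16, hy13_17, hy13_18, hy13_19, hy13_20, hy13_21, Ne.symm hy13_0, Ne.symm hy13_1, Ne.symm hy13_2, Ne.symm hy13_3, Ne.symm hy13_4, Ne.symm hy13_5, Ne.symm hy13_6, Ne.symm hy13_7, Ne.symm hy13_8, Ne.symm hy13_9, Ne.symm hy13_10, Ne.symm hy13_11, Ne.symm hy13_12, Ne.symm hy13_13, Ne.symm hy13_14, Ne.symm hy13_15, Ne.symm hy13_16, Ne.symm hy13_17, Ne.symm hy13_18, Ne.symm hy13_19, Ne.symm hy13_20, Ne.symm hy13_21, PySem.Dict.get?]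
  by_cases hx14 : x = "178.22.122.100"
  · subst hx14
    by_cases hy14_0 : y = "1.1.1.1"
    · subst hy14_0; decide
    by_cases hy14_1 : y = "1.0.0.1"
    · subst hy14_1; decide
    by_cases hy14_2 : y = "8.8.8.8"
    · subst hy14_2; decide
    by_cases hy14_3 : y = "8.8.4.4"
    · subst hy14_3; decide
    by_cases hy14_4 : y = "9.9.9.9"
    · subst hy14_4; decide
    by_cases hy14_5 : y = "49.112.112.112"
    · subst hy14_5; decide
    by_cases hy14_6 : y = "9.9.9.11"
    · subst hy14_6; decide
    by_cases hy14_7 : y = "149.112.112.11"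
    · subst hy14_7; decide
    by_cases hy14_8 : y = "64.6.64.6"
    · subst hy14_8; decide
    by_cases hy14_9 : y = "64.6.65.6"
    · subst hy14_9; decide
    by_cases hy14_10 : y = "94.140.14.14"
    · subst hy14_10; decide
    by_cases hy14_11 : y = "94.140.15.15"
    · subst hy14_11; decide
    by_cases hy14_12 : y = "78.157.42.100"
    · subst hy14_12; decide
    by_cases hy14_13 : y = "78.157.42.101"
    · subst hy14_13; decide
    by_cases hy14_14 : y = "178.22.122.100"
    · subst hy14_14; decide
    by_cases hy14_15 : y = "185.51.200.2"
    · subst hy14_15; decide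
    by_cases hy14_16 : y = "185.55.225.25"
    · subst hy14_16; decide
    by_cases hy14_17 : y = "185.55.226.26"
    · subst hy14_17; decide
    by_cases hy14_18 : y = "10.202.10.10"
    · subst hy14_18; decide
    by_cases hy14_19 : y = "10.202.10.11"
    · subst hy14_19; decide
    by_cases hy14_20 : y = "10.202.10.102"
    · subst hy14_20; decide
    by_cases hy14_21 : y = "10.202.10.202"
    · subst hy14_21; decide
    · simp only [find_resolver_by_ip, find_resolver_by_ip_alt, pvScan1, pvScan2, pvResolvers, pvIpToName, PySem.Dict.get?_mk_cons, PySem.List.len, PySem.List.pyGetD]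
      simp [hy14_0, hy14_1, hy14_2, hy14_3, hy14_4, hy14_5, hy14_6, hy14_7, hy14_8, hy14_9, hy14_10, hy14_11, hy14_12, hy14_13, hy14_14, hy14_15, hy14_16, hy14_17, hy14_18, hy14_19, hy14_20, hy14_21, Ne.symm hy14_0, Ne.symm hy14_1, Ne.symm hy14_2, Ne.symm hy14_3, Ne.symm hy14_4, Ne.symm hy14_5, Ne.symm hy14_6, Ne.symm hy14_7, Ne.symm hy14_8, Ne.symm hy14_9, Ne.symm hy14_10, Ne.symm hy14_11, Ne.symm hy14_12, Ne.symm hy14_13, Ne.symm hy14_14, Ne.symm hy14_15, Ne.symm hy14_16, Ne.symm hy14_17, Ne.symm hy14_18, Ne.symm hy14_19, Ne.symm hy14_20, Ne.symm hy14_21, PySem.Dict.get?]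
  by_cases hx15 : x = "185.51.200.2"
  · subst hx15
    by_cases hy15_0 : y = "1.1.1.1"
    · subst hy15_0; decide
    by_cases hy15_1 : y = "1.0.0.1"
    · subst hy15_1; decide
    by_cases hy15_2 : y = "8.8.8.8"
    · subst hy15_2; decide
    by_cases hy15_3 : y = "8.8.4.4"
    · subst hy15_3; decide
    by_cases hy15_4 : y = "9.9.9.9"
    · subst hy15_4; decide
    by_cases hy15_5 : y = "49.112.112.112"
    · subst hy15_5; decide
    by_cases hy15_6 : y = "9.9.9.11"
    · subst hy15_6; decide
    by_cases hy15_7 : y = "149.112.112.11"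
    · subst hy15_7; decide
    by_cases hy15_8 : y = "64.6.64.6"
    · subst hy15_8; decide
    by_cases hy15_9 : y = "64.6.65.6"
    · subst hy15_9; decide
    by_cases hy15_10 : y = "94.140.14.14"
    · subst hy15_10; decide
    by_cases hy15_11 : y = "94.140.15.15"
    · subst hy15_11; decide
    by_cases hy15_12 : y = "78.157.42.100"
    · subst hy15_12; decide
    by_cases hy15_13 : y = "78.157.42.101"
    · subst hy15_13; decide
    by_cases hy15_14 : y = "178.22.122.100"
    · subst hy15_14; decide
    by_cases hy15_15 : y = "185.51.200.2"
    · subst hy15_15; decide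
    by_cases hy15_16 : y = "185.55.225.25"
    · subst hy15_16; decide
    by_cases hy15_17 : y = "185.55.226.26"
    · subst hy15_17; decide
    by_cases hy15_18 : y = "10.202.10.10"
    · subst hy15_18; decide
    by_cases hy15_19 : y = "10.202.10.11"
    · subst hy15_19; decide
    by_cases hy15_20 : y = "10.202.10.102"
    · subst hy15_20; decide
    by_cases hy15_21 : y = "10.202.10.202"
    · subst hy15_21; decide
    · simp only [find_resolver_by_ip, find_resolver_by_ip_alt, pvScan1, pvScan2, pvResolvers, pvIpToName, PySem.Dict.get?_mk_cons, PySem.List.len, PySem.List.pyGetD]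
      simp [hy15_0, hy15_1, hy15_2, hy15_3, hy15_4, hy15_5, hy15_6, hy15_7, hy15_8, hy15_9, hy15_10, hy15_11, hy15_12, hy15_13, hy15_14, hy15_15, hy15_16, hy15_17, hy15_18, hy15_19, hy15_20, hy15_21, Ne.symm hy15_0, Ne.symm hy15_1, Ne.symm hy15_2, Ne.symm hy15_3, Ne.symm hy15_4, Ne.symm hy15_5, Ne.symm hy15_6, Ne.symm hy15_7, Ne.symm hy15_8, Ne.symm hy15_9, Ne.symm hy15_10, Ne.symm hy15_11, Ne.symm hy15_12, Ne.symm hy15_13, Ne.symm hy15_14, Ne.symm hy15_15, Ne.symm hy15_16, Ne.symm hy15_17, Ne.symm hy15_18, Ne.symm hy15_19, Ne.symm hy15_20, Ne.symm hy15_21, PySem.Dict.get?]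
  by_cases hx16 : x = "185.55.225.25"
  · subst hx16
    by_cases hy16_0 : y = "1.1.1.1"
    · subst hy16_0; decide
    by_cases hy16_1 : y = "1.0.0.1"
    · subst hy16_1; decide
    by_cases hy16_2 : y = "8.8.8.8"
    · subst hy16_2; decide
    by_cases hy16_3 : y = "8.8.4.4"
    · subst hy16_3; decide
    by_cases hy16_4 : y = "9.9.9.9"
    · subst hy16_4; decide
    by_cases hy16_5 : y = "49.112.112.112"
    · subst hy16_5; decide
    by_cases hy16_6 : y = "9.9.9.11"
    · subst hy16_6; decide
    by_cases hy16_7 : y = "149.112.112.11"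
    · subst hy16_7; decide
    by_cases hy16_8 : y = "64.6.64.6"
    · subst hy16_8; decide
    by_cases hy16_9 : y = "64.6.65.6"
    · subst hy16_9; decide
    by_cases hy16_10 : y = "94.140.14.14"
    · subst hy16_10; decide
    by_cases hy16_11 : y = "94.140.15.15"
    · subst hy16_11; decide
    by_cases hy16_12 : y = "78.157.42.100"
    · subst hy16_12; decide
    by_cases hy16_13 : y = "78.157.42.101"
    · subst hy16_13; decide
    by_cases hy16_14 : y = "178.22.122.100"
    · subst hy16_14; decide
    by_cases hy16_15 : y = "185.51.200.2"
    · subst hy16_15; decide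
    by_cases hy16_16 : y = "185.55.225.25"
    · subst hy16_16; decide
    by_cases hy16_17 : y = "185.55.226.26"
    · subst hy16_17; decide
    by_cases hy16_18 : y = "10.202.10.10"
    · subst hy16_18; decide
    by_cases hy16_19 : y = "10.202.10.11"
    · subst hy16_19; decide
    by_cases hy16_20 : y = "10.202.10.102"
    · subst hy16_20; decide
    by_cases hy16_21 : y = "10.202.10.202"
    · subst hy16_21; decide
    · simp only [find_resolver_by_ip, find_resolver_by_ip_alt, pvScan1, pvScan2, pvResolvers, pvIpToName, PySem.Dict.get?_mk_cons, PySem.List.len, PySem.List.pyGetD]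
      simp [hy16_0, hy16_1, hy16_2, hy16_3, hy16_4, hy16_5, hy16_6, hy16_7, hy16_8, hy16_9, hy16_10, hy16_11, hy16_12, hy16_13, hy16_14, hy16_15, hy16_16, hy16_17, hy16_18, hy16_19, hy16_20, hy16_21, Ne.symm hy16_0, Ne.symm hy16_1, Ne.symm hy16_2, Ne.symm hy16_3, Ne.symm hy16_4, Ne.symm hy16_5, Ne.symm hy16_6, Ne.symm hy16_7, Ne.symm hy16_8, Ne.symm hy16_9, Ne.symm hy16_10, Ne.symm hy16_11, Ne.symm hy16_12, Ne.symm hy16_13, Ne.symm hy16_14, Ne.symm hy16_15, Ne.symm hy16_16, Ne.symm hy16_17, Ne.symm hy16_18, Ne.symm hy16_19, Ne.symm hy16_20, Ne.symm hy16_21, PySem.Dict.get?]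
  by_cases hx17 : x = "185.55.226.26"
  · subst hx17
    by_cases hy17_0 : y = "1.1.1.1"
    · subst hy17_0; decide
    by_cases hy17_1 : y = "1.0.0.1"
    · subst hy17_1; decide
    by_cases hy17_2 : y = "8.8.8.8"
    · subst hy17_2; decide
    by_cases hy17_3 : y = "8.8.4.4"
    · subst hy17_3; decide
    by_cases hy17_4 : y = "9.9.9.9"
    · subst hy17_4; decide
    by_cases hy17_5 : y = "49.112.112.112"
    · subst hy17_5; decide
    by_cases hy17_6 : y = "9.9.9.11"
    · subst hy17_6; decide
    by_cases hy17_7 : y = "149.112.112.11"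
    · subst hy17_7; decide
    by_cases hy17_8 : y = "64.6.64.6"
    · subst hy17_8; decide
    by_cases hy17_9 : y = "64.6.65.6"
    · subst hy17_9; decide
    by_cases hy17_10 : y = "94.140.14.14"
    · subst hy17_10; decide
    by_cases hy17_11 : y = "94.140.15.15"
    · subst hy17_11; decide
    by_cases hy17_12 : y = "78.157.42.100"
    · subst hy17_12; decide
    by_cases hy17_13 : y = "78.157.42.101"
    · subst hy17_13; decide
    by_cases hy17_14 : y = "178.22.122.100"
    · subst hy17_14; decide
    by_cases hy17_15 : y = "185.51.200.2"
    · subst hy17_15; decide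
    by_cases hy17_16 : y = "185.55.225.25"
    · subst hy17_16; decide
    by_cases hy17_17 : y = "185.55.226.26"
    · subst hy17_17; decide
    by_cases hy17_18 : y = "10.202.10.10"
    · subst hy17_18; decide
    by_cases hy17_19 : y = "10.202.10.11"
    · subst hy17_19; decide
    by_cases hy17_20 : y = "10.202.10.102"
    · subst hy17_20; decide
    by_cases hy17_21 : y = "10.202.10.202"
    · subst hy17_21; decide
    · simp only [find_resolver_by_ip, find_resolver_by_ip_alt, pvScan1, pvScan2, pvResolvers, pvIpToName, PySem.Dict.get?_mk_cons, PySem.List.len, PySem.List.pyGetD]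
      simp [hy17_0, hy17_1, hy17_2, hy17_3, hy17_4, hy17_5, hy17_6, hy17_7, hy17_8, hy17_9, hy17_10, hy17_11, hy17_12, hy17_13, hy17_14, hy17_15, hy17_16, hy17_17, hy17_18, hy17_19, hy17_20, hy17_21, Ne.symm hy17_0, Ne.symm hy17_1, Ne.symm hy17_2, Ne.symm hy17_3, Ne.symm hy17_4, Ne.symm hy17_5, Ne.symm hy17_6, Ne.symm hy17_7, Ne.symm hy17_8, Ne.symm hy17_9, Ne.symm hy17_10, Ne.symm hy17_11, Ne.symm hy17_12, Ne.symm hy17_13, Ne.symm hy17_14, Ne.symm hy17_15, Ne.symm hy17_16, Ne.symm hy17_17, Ne.symm hy17_18, Ne.symm hy17_19, Ne.symm hy17_20, Ne.symm hy17_21, PySem.Dict.get?]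
  by_cases hx18 : x = "10.202.10.10"
  · subst hx18
    by_cases hy18_0 : y = "1.1.1.1"
    · subst hy18_0; decide
    by_cases hy18_1 : y = "1.0.0.1"
    · subst hy18_1; decide
    by_cases hy18_2 : y = "8.8.8.8"
    · subst hy18_2; decide
    by_cases hy18_3 : y = "8.8.4.4"
    · subst hy18_3; decide
    by_cases hy18_4 : y = "9.9.9.9"
    · subst hy18_4; decide
    by_cases hy18_5 : y = "49.112.112.112"
    · subst hy18_5; decide
    by_cases hy18_6 : y = "9.9.9.11"
    · subst hy18_6; decide
    by_cases hy18_7 : y = "149.112.112.11"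
    · subst hy18_7; decide
    by_cases hy18_8 : y = "64.6.64.6"
    · subst hy18_8; decide
    by_cases hy18_9 : y = "64.6.65.6"
    · subst hy18_9; decide
    by_cases hy18_10 : y = "94.140.14.14"
    · subst hy18_10; decide
    by_cases hy18_11 : y = "94.140.15.15"
    · subst hy18_11; decide
    by_cases hy18_12 : y = "78.157.42.100"
    · subst hy18_12; decide
    by_cases hy18_13 : y = "78.157.42.101"
    · subst hy18_13; decide
    by_cases hy18_14 : y = "178.22.122.100"
    · subst hy18_14; decide
    by_cases hy18_15 : y = "185.51.200.2"
    · subst hy18_15; decide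
    by_cases hy18_16 : y = "185.55.225.25"
    · subst hy18_16; decide
    by_cases hy18_17 : y = "185.55.226.26"
    · subst hy18_17; decide
    by_cases hy18_18 : y = "10.202.10.10"
    · subst hy18_18; decide
    by_cases hy18_19 : y = "10.202.10.11"
    · subst hy18_19; decide
    by_cases hy18_20 : y = "10.202.10.102"
    · subst hy18_20; decide
    by_cases hy18_21 : y = "10.202.10.202"
    · subst hy18_21; decide
    · simp only [find_resolver_by_ip, find_resolver_by_ip_alt, pvScan1, pvScan2, pvResolvers, pvIpToName, PySem.Dict.get?_mk_cons, PySem.List.len, PySem.List.pyGetD]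
      simp [hy18_0, hy18_1, hy18_2, hy18_3, hy18_4, hy18_5, hy18_6, hy18_7, hy18_8, hy18_9, hy18_10, hy18_11, hy18_12, hy18_13, hy18_14, hy18_15, hy18_16, hy18_17, hy18_18, hy18_19, hy18_20, hy18_21, Ne.symm hy18_0, Ne.symm hy18_1, Ne.symm hy18_2, Ne.symm hy18_3, Ne.symm hy18_4, Ne.symm hy18_5, Ne.symm hy18_6, Ne.symm hy18_7, Ne.symm hy18_8, Ne.symm hy18_9, Ne.symm hy18_10, Ne.symm hy18_11, Ne.symm hy18_12, Ne.symm hy18_13, Ne.symm hy18_14, Ne.symm hy18_15, Ne.symm hy18_16, Ne.symm hy18_17, Ne.symm hy18_18, Ne.symm hy18_19, Ne.symm hy18_20, Ne.symm hy18_21, PySem.Dict.get?]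
  by_cases hx19 : x = "10.202.10.11"
  · subst hx19
    by_cases hy19_0 : y = "1.1.1.1"
    · subst hy19_0; decide
    by_cases hy19_1 : y = "1.0.0.1"
    · subst hy19_1; decide
    by_cases hy19_2 : y = "8.8.8.8"
    · subst hy19_2; decide
    by_cases hy19_3 : y = "8.8.4.4"
    · subst hy19_3; decide
    by_cases hy19_4 : y = "9.9.9.9"
    · subst hy19_4; decide
    by_cases hy19_5 : y = "49.112.112.112"
    · subst hy19_5; decide
    by_cases hy19_6 : y = "9.9.9.11"
    · subst hy19_6; decide
    by_cases hy19_7 : y = "149.112.112.11"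
    · subst hy19_7; decide
    by_cases hy19_8 : y = "64.6.64.6"
    · subst hy19_8; decide
    by_cases hy19_9 : y = "64.6.65.6"
    · subst hy19_9; decide
    by_cases hy19_10 : y = "94.140.14.14"
    · subst hy19_10; decide
    by_cases hy19_11 : y = "94.140.15.15"
    · subst hy19_11; decide
    by_cases hy19_12 : y = "78.157.42.100"
    · subst hy19_12; decide
    by_cases hy19_13 : y = "78.157.42.101"
    · subst hy19_13; decide
    by_cases hy19_14 : y = "178.22.122.100"
    · subst hy19_14; decide
    by_cases hy19_15 : y = "185.51.200.2"
    · subst hy19_15; decide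
    by_cases hy19_16 : y = "185.55.225.25"
    · subst hy19_16; decide
    by_cases hy19_17 : y = "185.55.226.26"
    · subst hy19_17; decide
    by_cases hy19_18 : y = "10.202.10.10"
    · subst hy19_18; decide
    by_cases hy19_19 : y = "10.202.10.11"
    · subst hy19_19; decide
    by_cases hy19_20 : y = "10.202.10.102"
    · subst hy19_20; decide
    by_cases hy19_21 : y = "10.202.10.202"
    · subst hy19_21; decide
    · simp only [find_resolver_by_ip, find_resolver_by_ip_alt, pvScan1, pvScan2, pvResolvers, pvIpToName, PySem.Dict.get?_mk_cons, PySem.List.len, PySem.List.pyGetD]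
      simp [hy19_0, hy19_1, hy19_2, hy19_3, hy19_4, hy19_5, hy19_6, hy19_7, hy19_8, hy19_9, hy19_10, hy19_11, hy19_12, hy19_13, hy19_14, hy19_15, hy19_16, hy19_17, hy19_18, hy19_19, hy19_20, hy19_21, Ne.symm hy19_0, Ne.symm hy19_1, Ne.symm hy19_2, Ne.symm hy19_3, Ne.symm hy19_4, Ne.symm hy19_5, Ne.symm hy19_6, Ne.symm hy19_7, Ne.symm hy19_8, Ne.symm hy19_9, Ne.symm hy19_10, Ne.symm hy19_11, Ne.symm hy19_12, Ne.symm hy19_13, Ne.symm hy19_14, Ne.symm hy19_15, Ne.symm hy19_16, Ne.symm hy19_17, Ne.symm hy19_18, Ne.symm hy19_19, Ne.symm hy19_20, Ne.symm hy19_21, PySem.Dict.get?]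
  by_cases hx20 : x = "10.202.10.102"
  · subst hx20
    by_cases hy20_0 : y = "1.1.1.1"
    · subst hy20_0; decide
    by_cases hy20_1 : y = "1.0.0.1"
    · subst hy20_1; decide
    by_cases hy20_2 : y = "8.8.8.8"
    · subst hy20_2; decide
    by_cases hy20_3 : y = "8.8.4.4"
    · subst hy20_3; decide
    by_cases hy20_4 : y = "9.9.9.9"
    · subst hy20_4; decide
    by_cases hy20_5 : y = "49.112.112.112"
    · subst hy20_5; decide
    by_cases hy20_6 : y = "9.9.9.11"
    · subst hy20_6; decide
    by_cases hy20_7 : y = "149.112.112.11"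
    · subst hy20_7; decide
    by_cases hy20_8 : y = "64.6.64.6"
    · subst hy20_8; decide
    by_cases hy20_9 : y = "64.6.65.6"
    · subst hy20_9; decide
    by_cases hy20_10 : y = "94.140.14.14"
    · subst hy20_10; decide
    by_cases hy20_11 : y = "94.140.15.15"
    · subst hy20_11; decide
    by_cases hy20_12 : y = "78.157.42.100"
    · subst hy20_12; decide
    by_cases hy20_13 : y = "78.157.42.101"
    · subst hy20_13; decide
    by_cases hy20_14 : y = "178.22.122.100"
    · subst hy20_14; decide
    by_cases hy20_15 : y = "185.51.200.2"
    · subst hy20_15; decide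
    by_cases hy20_16 : y = "185.55.225.25"
    · subst hy20_16; decide
    by_cases hy20_17 : y = "185.55.226.26"
    · subst hy20_17; decide
    by_cases hy20_18 : y = "10.202.10.10"
    · subst hy20_18; decide
    by_cases hy20_19 : y = "10.202.10.11"
    · subst hy20_19; decide
    by_cases hy20_20 : y = "10.202.10.102"
    · subst hy20_20; decide
    by_cases hy20_21 : y = "10.202.10.202"
    · subst hy20_21; decide
    · simp only [find_resolver_by_ip, find_resolver_by_ip_alt, pvScan1, pvScan2, pvResolvers, pvIpToName, PySem.Dict.get?_mk_cons, PySem.List.len, PySem.List.pyGetD]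
      simp [hy20_0, hy20_1, hy20_2, hy20_3, hy20_4, hy20_5, hy20_6, hy20_7, hy20_8, hy20_9, hy20_10, hy20_11, hy20_12, hy20_13, hy20_14, hy20_15, hy20_16, hy20_17, hy20_18, hy20_19, hy20_20, hy20_21, Ne.symm hy20_0, Ne.symm hy20_1, Ne.symm hy20_2, Ne.symm hy20_3, Ne.symm hy20_4, Ne.symm hy20_5, Ne.symm hy20_6, Ne.symm hy20_7, Ne.symm hy20_8, Ne.symm hy20_9, Ne.symm hy20_10, Ne.symm hy20_11, Ne.symm hy20_12, Ne.symm hy20_13, Ne.symm hy20_14, Ne.symm hy20_15, Ne.symm hy20_16, Ne.symm hy20_17, Ne.symm hy20_18, Ne.symm hy20_19, Ne.symm hy20_20, Ne.symm hy20_21, PySem.Dict.get?]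
  by_cases hx21 : x = "10.202.10.202"
  · subst hx21
    by_cases hy21_0 : y = "1.1.1.1"
    · subst hy21_0; decide
    by_cases hy21_1 : y = "1.0.0.1"
    · subst hy21_1; decide
    by_cases hy21_2 : y = "8.8.8.8"
    · subst hy21_2; decide
    by_cases hy21_3 : y = "8.8.4.4"
    · subst hy21_3; decide
    by_cases hy21_4 : y = "9.9.9.9"
    · subst hy21_4; decide
    by_cases hy21_5 : y = "49.112.112.112"
    · subst hy21_5; decide
    by_cases hy21_6 : y = "9.9.9.11"
    · subst hy21_6; decide
    by_cases hy21_7 : y = "149.112.112.11"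
    · subst hy21_7; decide
    by_cases hy21_8 : y = "64.6.64.6"
    · subst hy21_8; decide
    by_cases hy21_9 : y = "64.6.65.6"
    · subst hy21_9; decide
    by_cases hy21_10 : y = "94.140.14.14"
    · subst hy21_10; decide
    by_cases hy21_11 : y = "94.140.15.15"
    · subst hy21_11; decide
    by_cases hy21_12 : y = "78.157.42.100"
    · subst hy21_12; decide
    by_cases hy21_13 : y = "78.157.42.101"
    · subst hy21_13; decide
    by_cases hy21_14 : y = "178.22.122.100"
    · subst hy21_14; decide
    by_cases hy21_15 : y = "185.51.200.2"
    · subst hy21_15; decide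
    by_cases hy21_16 : y = "185.55.225.25"
    · subst hy21_16; decide
    by_cases hy21_17 : y = "185.55.226.26"
    · subst hy21_17; decide
    by_cases hy21_18 : y = "10.202.10.10"
    · subst hy21_18; decide
    by_cases hy21_19 : y = "10.202.10.11"
    · subst hy21_19; decide
    by_cases hy21_20 : y = "10.202.10.102"
    · subst hy21_20; decide
    by_cases hy21_21 : y = "10.202.10.202"
    · subst hy21_21; decide
    · simp only [find_resolver_by_ip, find_resolver_by_ip_alt, pvScan1, pvScan2, pvResolvers, pvIpToName, PySem.Dict.get?_mk_cons, PySem.List.len, PySem.List.pyGetD]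
      simp [hy21_0, hy21_1, hy21_2, hy21_3, hy21_4, hy21_5, hy21_6, hy21_7, hy21_8, hy21_9, hy21_10, hy21_11, hy21_12, hy21_13, hy21_14, hy21_15, hy21_16, hy21_17, hy21_18, hy21_19, hy21_20, hy21_21, Ne.symm hy21_0, Ne.symm hy21_1, Ne.symm hy21_2, Ne.symm hy21_3, Ne.symm hy21_4, Ne.symm hy21_5, Ne.symm hy21_6, Ne.symm hy21_7, Ne.symm hy21_8, Ne.symm hy21_9, Ne.symm hy21_10, Ne.symm hy21_11, Ne.symm hy21_12, Ne.symm hy21_13, Ne.symm hy21_14, Ne.symm hy21_15, Ne.symm hy21_16, Ne.symm hy21_17, Ne.symm hy21_18, Ne.symm hy21_19, Ne.symm hy21_20, Ne.symm hy21_21, PySem.Dict.get?]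
  · simp only [find_resolver_by_ip, find_resolver_by_ip_alt, pvScan1, pvScan2, pvResolvers, pvIpToName, PySem.Dict.get?_mk_cons, PySem.List.len, PySem.List.pyGetD]
    simp [hx0, hx1, hx2, hx3, hx4, hx5, hx6, hx7, hx8, hx9, hx10, hx11, hx12, hx13, hx14, hx15, hx16, hx17, hx18, hx19, hx20, hx21, Ne.symm hx0, Ne.symm hx1, Ne.symm hx2, Ne.symm hx3, Ne.symm hx4, Ne.symm hx5, Ne.symm hx6, Ne.symm hx7, Ne.symm hx8, Ne.symm hx9, Ne.symm hx10, Ne.symm hx11, Ne.symm hx12, Ne.symm hx13, Ne.symm hx14, Ne.symm hx15, Ne.symm hx16, Ne.symm hx17, Ne.symm hx18, Ne.symm hx19, Ne.symm hx20, Ne.symm hx21, PySem.Dict.get?]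


-- ===== VERDICT (by name: the statement is the Claim_ definition above) =====
theorem find_resolver_by_ip_spec : Claim_equal_find_resolver_by_ip := by
  intro ips _
  unfold Spec_find_resolver_by_ip
  match ips with
  | [] => rfl
  | [x] => exact pvCase1 x
  | [x, y] => exact pvCase2 x y
  | x :: y :: z :: rest =>
    have h1 : ((rest.length : Int) + 1 + 1) ≠ 0 := by omega
    have h2 : ((rest.length : Int) + 1 + 1 + 1) ≠ 2 := by omega
    simp [find_resolver_by_ip, find_resolver_by_ip_alt, h1, h2]
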